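-- pv_equiv track=rewrite | github.com/ebuonocore/pointillisme | traitement_image.py | construit_matrice_disque
-- ===== SOURCE A (Python) =====
-- def construit_matrice_disque(rayon_max):
--     """Construit une matrice de disque de rayon pas//2"""
--     matrice = []
--     for rayon in range(rayon_max):
--         matrice_disque = []
--         for dx in range(-rayon, rayon):
--             for dy in range(-rayon, rayon):
--                 if dx**2 + dy**2 < rayon**2:
--                     matrice_disque.append((dx, dy))
--         matrice.append(matrice_disque)
--     return matrice
-- ===== SOURCE B (Python) =====
-- def construit_matrice_disque(rayon_max):
--     """Construit une matrice de disque de rayon pas//2"""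
--     matrice = []
--     for rayon in range(rayon_max):
--         matrice_disque = []
--         for dx in range(-rayon, rayon):
--             k = rayon * rayon - dx * dx
--             if k > 0:
--                 # largest m with m*m < k, found by a downward search from rayon - 1
--                 m = rayon - 1
--                 while m * m >= k:
--                     m -= 1
--                 matrice_disque.extend([(dx, dy) for dy in range(-m, m + 1)])
--         matrice.append(matrice_disque)
--     return matrice
-- ===== Notes on version B (the rewrite author's own statement) =====
-- stated objective: alternative
-- what changed: The inner brute-force dy scan with a per-point dx**2+dy**2<rayon**2 test is replaced by directly computing, for each dx, the chord half-width m (largest m with m*m < rayon**2-dx**2, found by a short downward search) and emitting the dy interval range(-m, m+1) wholesale.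
import Mathlib
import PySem

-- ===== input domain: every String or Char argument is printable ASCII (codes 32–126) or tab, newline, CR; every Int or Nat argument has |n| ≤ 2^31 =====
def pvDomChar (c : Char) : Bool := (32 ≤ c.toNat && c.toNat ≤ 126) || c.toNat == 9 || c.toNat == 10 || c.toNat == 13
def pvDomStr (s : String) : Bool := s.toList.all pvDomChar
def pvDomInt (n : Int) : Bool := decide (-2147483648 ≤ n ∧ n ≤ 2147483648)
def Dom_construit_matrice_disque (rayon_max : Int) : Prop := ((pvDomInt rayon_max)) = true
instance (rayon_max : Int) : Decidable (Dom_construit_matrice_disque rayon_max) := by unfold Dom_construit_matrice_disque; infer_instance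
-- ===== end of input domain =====

-- B replaces A's brute-force dy scan (test every dy in [-rayon, rayon)) by directly computing,
-- for each dx, the dy interval [-m, m] of the disk row; same points in the same order ("alternative").

-- ===== PORT A =====
def construit_matrice_disque (rayon_max : Int) : List (List (Int × Int)) :=
  (PySem.List.pyRange 0 rayon_max 1).foldl (fun matrice rayon =>
    matrice ++ [(PySem.List.pyRange (-rayon) rayon 1).foldl (fun md dx =>
      (PySem.List.pyRange (-rayon) rayon 1).foldl (fun md dy =>
        if dx ^ 2 + dy ^ 2 < rayon ^ 2 then md ++ [(dx, dy)] else md) md) []]) []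

-- ===== PORT B =====
-- the 'while m * m >= k: m -= 1' loop of Source B, counting down from its start value (structural on the start)
def pvFindM (k : Int) : Nat → Nat
  | 0 => 0
  | m + 1 => if k ≤ ((m : Int) + 1) * ((m : Int) + 1) then pvFindM k m else m + 1

def construit_matrice_disque_alt (rayon_max : Int) : List (List (Int × Int)) :=
  (PySem.List.pyRange 0 rayon_max 1).foldl (fun matrice rayon =>
    matrice ++ [(PySem.List.pyRange (-rayon) rayon 1).foldl (fun md dx =>
      let k := rayon * rayon - dx * dx
      if 0 < k then
        let m : Int := (pvFindM k (rayon - 1).toNat : Nat)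
        md ++ (PySem.List.pyRange (-m) (m + 1) 1).map (fun dy => (dx, dy))
      else md) []]) []

-- ===== PRECONDITION & SPEC =====
def Spec_construit_matrice_disque (rayon_max : Int) (out : List (List (Int × Int))) : Prop := out = construit_matrice_disque_alt rayon_max
instance (rayon_max : Int) (out : List (List (Int × Int))) : Decidable (Spec_construit_matrice_disque rayon_max out) := by unfold Spec_construit_matrice_disque; infer_instance

-- ===== CLAIM (what is proved, stated in full; the proofs are below) =====
def Claim_equal_construit_matrice_disque : Prop := ∀ (rayon_max : Int), Dom_construit_matrice_disque rayon_max → Spec_construit_matrice_disque rayon_max (construit_matrice_disque rayon_max)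

-- ===== LEMMAS AND PROOFS =====

-- the search result squares below k (when 0 < k)
lemma pvFindM_sq_lt (k : Int) (hk : 0 < k) : ∀ n : Nat, ((pvFindM k n : Nat) : Int) * ((pvFindM k n : Nat) : Int) < k := by
  intro n
  induction n with
  | zero => simpa [pvFindM] using hk
  | succ m ih =>
      by_cases h : k ≤ ((m : Int) + 1) * ((m : Int) + 1)
      · simpa [pvFindM, h] using ih
      · simp only [pvFindM, if_neg h]
        push_cast
        omega

-- the search result is the LARGEST value ≤ its start whose square is below k
lemma pvFindM_ge (k : Int) : ∀ (n : Nat) (j : Int), 0 ≤ j → j ≤ (n : Int) → j * j < k → j ≤ ((pvFindM k n : Nat) : Int) := by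
  intro n
  induction n with
  | zero => intro j h0 h1 _; simpa [pvFindM] using h1
  | succ m ih =>
      intro j h0 h1 hj
      by_cases h : k ≤ ((m : Int) + 1) * ((m : Int) + 1)
      · have hjm : j ≤ (m : Int) := by
          rcases lt_or_eq_of_le h1 with h' | h'
          · push_cast at h' ⊢; omega
          · exfalso; rw [h'] at hj; push_cast at hj; omega
        simpa [pvFindM, h] using ih j h0 hjm hj
      · simp only [pvFindM, if_neg h]
        push_cast at h1 ⊢
        omega

lemma pvFindM_le : ∀ (k : Int) (n : Nat), pvFindM k n ≤ n := by
  intro k n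
  induction n with
  | zero => simp [pvFindM]
  | succ m ih =>
      by_cases h : k ≤ ((m : Int) + 1) * ((m : Int) + 1)
      · simp only [pvFindM, if_pos h]; omega
      · simp [pvFindM, if_neg h]

-- one row of the disk: A's filtered dy scan equals B's computed interval
lemma row_eq (rayon dx : Int) (h1 : -rayon ≤ dx) (h2 : dx < rayon) (md : List (Int × Int)) :
    (PySem.List.pyRange (-rayon) rayon 1).foldl (fun md dy =>
        if dx ^ 2 + dy ^ 2 < rayon ^ 2 then md ++ [(dx, dy)] else md) md
    = (let k := rayon * rayon - dx * dx
       if 0 < k then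
         let m : Int := (pvFindM k (rayon - 1).toNat : Nat)
         md ++ (PySem.List.pyRange (-m) (m + 1) 1).map (fun dy => (dx, dy))
       else md) := by
  have hr1 : 1 ≤ rayon := by omega
  rw [PySem.List.foldl_append_ite (fun dy => dx ^ 2 + dy ^ 2 < rayon ^ 2) (fun dy => (dx, dy))]
  set k : Int := rayon * rayon - dx * dx with hk
  by_cases hkpos : 0 < k
  · simp only [if_pos hkpos]
    set M : Int := ((pvFindM k (rayon - 1).toNat : Nat) : Int) with hM
    have hM0 : 0 ≤ M := by positivity
    have hMlt : M * M < k := pvFindM_sq_lt k hkpos _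
    have hMr : M ≤ rayon - 1 := by
      have := pvFindM_le k (rayon - 1).toNat
      have : ((pvFindM k (rayon - 1).toNat : Nat) : Int) ≤ ((rayon - 1).toNat : Int) := by
        exact_mod_cast this
      omega
    have hiff : ∀ dy : Int, (dx ^ 2 + dy ^ 2 < rayon ^ 2) ↔ (-M ≤ dy ∧ dy ≤ M) := by
      intro dy
      constructor
      · intro h
        have hdy : dy * dy < k := by nlinarith
        have habs : |dy| ≤ rayon - 1 := by nlinarith [abs_nonneg dy, sq_abs dy, abs_nonneg dx, sq_abs dx]
        have hj : |dy| ≤ ((pvFindM k (rayon - 1).toNat : Nat) : Int) := by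
          apply pvFindM_ge k (rayon - 1).toNat |dy| (abs_nonneg dy)
          · omega
          · nlinarith [sq_abs dy]
        rw [← hM] at hj
        constructor <;> [skip; skip] <;> cases abs_le.mp hj <;> omega
      · intro ⟨ha, hb⟩
        have : dy * dy ≤ M * M := by nlinarith
        nlinarith
    have hsplit : PySem.List.pyRange (-rayon) rayon =
        PySem.List.pyRange (-rayon) (-M) ++ PySem.List.pyRange (-M) (M + 1) ++ PySem.List.pyRange (M + 1) rayon := by
      rw [PySem.List.pyRange_one_append (-rayon) (-M) rayon (by omega) (by omega),
          PySem.List.pyRange_one_append (-M) (M + 1) rayon (by omega) (by omega),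
          List.append_assoc]
    rw [hsplit]
    rw [List.filter_append, List.filter_append]
    have hleft : (PySem.List.pyRange (-rayon) (-M)).filter (fun dy => decide (dx ^ 2 + dy ^ 2 < rayon ^ 2)) = [] := by
      rw [List.filter_eq_nil_iff]
      intro dy hdy
      have := PySem.List.mem_pyRange_one.mp hdy
      simp only [decide_eq_true_eq]
      intro hc
      have := (hiff dy).mp hc
      omega
    have hright : (PySem.List.pyRange (M + 1) rayon).filter (fun dy => decide (dx ^ 2 + dy ^ 2 < rayon ^ 2)) = [] := by
      rw [List.filter_eq_nil_iff]
      intro dy hdy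
      have := PySem.List.mem_pyRange_one.mp hdy
      simp only [decide_eq_true_eq]
      intro hc
      have := (hiff dy).mp hc
      omega
    have hmid : (PySem.List.pyRange (-M) (M + 1)).filter (fun dy => decide (dx ^ 2 + dy ^ 2 < rayon ^ 2)) = PySem.List.pyRange (-M) (M + 1) := by
      rw [List.filter_eq_self]
      intro dy hdy
      have := PySem.List.mem_pyRange_one.mp hdy
      simp only [decide_eq_true_eq]
      exact (hiff dy).mpr ⟨this.1, by omega⟩
    rw [hleft, hright, hmid]
    simp
  · simp only [if_neg hkpos]
    have : (PySem.List.pyRange (-rayon) rayon).filter (fun dy => decide (dx ^ 2 + dy ^ 2 < rayon ^ 2)) = [] := by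
      rw [List.filter_eq_nil_iff]
      intro dy hdy
      simp only [decide_eq_true_eq]
      intro hc
      nlinarith [sq_nonneg dy, sq_nonneg dx]
    rw [this]
    simp

-- one disk: the whole dx loop agrees
lemma disque_eq (rayon : Int) :
    (PySem.List.pyRange (-rayon) rayon 1).foldl (fun md dx =>
      (PySem.List.pyRange (-rayon) rayon 1).foldl (fun md dy =>
        if dx ^ 2 + dy ^ 2 < rayon ^ 2 then md ++ [(dx, dy)] else md) md) []
    = (PySem.List.pyRange (-rayon) rayon 1).foldl (fun md dx =>
      let k := rayon * rayon - dx * dx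
      if 0 < k then
        let m : Int := (pvFindM k (rayon - 1).toNat : Nat)
        md ++ (PySem.List.pyRange (-m) (m + 1) 1).map (fun dy => (dx, dy))
      else md) [] := by
  apply PySem.List.foldl_congr_mem
  intro md dx hdx
  have hmem := PySem.List.mem_pyRange_one.mp hdx
  exact row_eq rayon dx hmem.1 hmem.2 md

-- ===== VERDICT (by name: the statement is the Claim_ definition above) =====
theorem construit_matrice_disque_spec : Claim_equal_construit_matrice_disque := by
  intro rayon_max _
  unfold Spec_construit_matrice_disque construit_matrice_disque construit_matrice_disque_alt
  apply PySem.List.foldl_congr_mem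
  intro acc rayon _
  rw [disque_eq]
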